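-- pv_equiv track=rewrite | github.com/DavierSB/Scrabble-and-IA-project | src/Game/board.py | __elaborate_answer
-- ===== SOURCE A (Python) =====
-- from typing import List, Tuple, Dict
--
-- def __elaborate_answer(words: List[Tuple[str, str, int]]) -> Tuple[bool, int, str]:
--     """Given a list of the words formed by a play, Returns a tuple, where the first element states if is a valid play, the second one the punctuation and the third one a message\n
--     Such message will be listing the wrong words if the play is not valid, and otherwise will be a description of the play
--     """
--     points = 0
--     wrong_words = []
--     msg = ""
--     for word in words:
--         if word[2] is None:
--             wrong_words.append(word[1])
--         else:
--             points += word[2]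
--             msg += word[0] + " " + word[1] + " " + str(word[2]) + ", "
--     if len(wrong_words) > 0:
--         msg = "Invalid words: " + ", ".join(wrong_words)
--         return (False, None, msg)
--     return (True, points, msg[:-2])
-- ===== SOURCE B (Python) =====
-- def __elaborate_answer(words):
--     # Divide-and-conquer reduction: each half yields (wrong_words, points, msg),
--     # halves are merged by concatenation / addition / separator-joining.
--     def solve(lo, hi):
--         if hi - lo == 0:
--             return ([], 0, "")
--         if hi - lo == 1:
--             w0, w1, v = words[lo]
--             if v is None:
--                 return ([w1], 0, "")
--             return ([], v, "%s %s %s" % (w0, w1, v))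
--         mid = (lo + hi) // 2
--         lw, lp, lm = solve(lo, mid)
--         rw, rp, rm = solve(mid, hi)
--         return (lw + rw, lp + rp, lm + ", " + rm if lm and rm else lm + rm)
--     wrongs, points, msg = solve(0, len(words))
--     if wrongs:
--         return (False, None, "Invalid words: " + ", ".join(wrongs))
--     return (True, points, msg)
-- ===== Notes on version B (the rewrite author's own statement) =====
-- stated objective: alternative
-- what changed: B replaces A's single left-to-right accumulating loop (running points, wrong-word list and a message with a trailing ', ' trimmed by msg[:-2]) with a divide-and-conquer reduction: solve(lo,hi) recursively splits the index range in half and merges the halves' (wrongs, points, msg) triples, inserting the ', ' separator only between two non-empty half-messages, so no trim is ever needed.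
import Mathlib
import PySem

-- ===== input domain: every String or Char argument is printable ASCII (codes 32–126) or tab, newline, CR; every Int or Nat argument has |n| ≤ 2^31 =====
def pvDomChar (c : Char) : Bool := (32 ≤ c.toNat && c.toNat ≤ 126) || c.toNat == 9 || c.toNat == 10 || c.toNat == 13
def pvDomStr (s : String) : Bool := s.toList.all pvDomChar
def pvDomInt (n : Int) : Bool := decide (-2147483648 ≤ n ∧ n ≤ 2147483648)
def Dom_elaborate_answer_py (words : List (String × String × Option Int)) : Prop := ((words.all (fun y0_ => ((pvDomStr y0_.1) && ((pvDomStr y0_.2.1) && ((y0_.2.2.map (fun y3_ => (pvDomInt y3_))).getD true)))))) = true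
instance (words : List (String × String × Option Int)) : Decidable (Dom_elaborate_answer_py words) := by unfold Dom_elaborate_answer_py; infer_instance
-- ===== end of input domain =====

-- B replaces A's single interleaved accumulating loop (with a trailing-comma trim) by a
-- divide-and-conquer reduction merging (wrongs, points, msg) of the two halves; objective: alternative.

-- ===== PORT A =====
-- A's loop state: (points, wrong_words, msg as List Char), one fold over words.
def elaborate_answer_py (words : List (String × String × Option Int)) : Bool × Option Int × String :=
  let st := words.foldl
    (fun (st : Int × List String × List Char) w =>
      match w.2.2 with
      | none => (st.1, st.2.1 ++ [w.2.1], st.2.2)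
      | some v => (st.1 + v, st.2.1,
          st.2.2 ++ w.1.toList ++ [' '] ++ w.2.1.toList ++ [' '] ++ PySem.Int.toChars v ++ [',', ' ']))
    (0, [], [])
  if st.2.1.length > 0 then
    (false, none, String.ofList ("Invalid words: ".toList ++ PySem.Chars.join [',', ' '] (st.2.1.map (·.toList))))
  else
    (true, some st.1, String.ofList (PySem.List.slice st.2.2 none (some (-2))))  -- msg[:-2]

-- ===== PORT B =====
-- Source B's recursive solve(lo, hi): ported on the sublist words[lo:hi]; mid = (lo+hi)//2 splits
-- the sublist at (hi-lo)//2 = its half length, i.e. take/drop at length/2.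
def pvSolve (ws : List (String × String × Option Int)) : List String × Int × List Char :=
  match ws with
  | [] => ([], 0, [])
  | [w] =>
    match w.2.2 with
    | none => ([w.2.1], 0, [])
    | some v => ([], v, w.1.toList ++ [' '] ++ w.2.1.toList ++ [' '] ++ PySem.Int.toChars v)
  | a :: b :: t =>
    let mid := (a :: b :: t).length / 2
    let l := pvSolve ((a :: b :: t).take mid)
    let r := pvSolve ((a :: b :: t).drop mid)
    (l.1 ++ r.1, l.2.1 + r.2.1,
     if l.2.2 ≠ [] ∧ r.2.2 ≠ [] then l.2.2 ++ [',', ' '] ++ r.2.2 else l.2.2 ++ r.2.2)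
termination_by ws.length
decreasing_by
  · simp [List.length_take]; omega
  · simp; omega

def elaborate_answer_py_alt (words : List (String × String × Option Int)) : Bool × Option Int × String :=
  let s := pvSolve words
  if !s.1.isEmpty then
    (false, none, String.ofList ("Invalid words: ".toList ++ PySem.Chars.join [',', ' '] (s.1.map (·.toList))))
  else
    (true, some s.2.1, String.ofList s.2.2)

-- ===== PRECONDITION & SPEC =====
def Spec_elaborate_answer_py (words : List (String × String × Option Int)) (out : Bool × Option Int × String) : Prop := out = elaborate_answer_py_alt words
instance (words : List (String × String × Option Int)) (out : Bool × Option Int × String) : Decidable (Spec_elaborate_answer_py words out) := by unfold Spec_elaborate_answer_py; infer_instance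

-- ===== CLAIM (what is proved, stated in full; the proofs are below) =====
def Claim_equal_elaborate_answer_py : Prop := ∀ (words : List (String × String × Option Int)), Dom_elaborate_answer_py words → Spec_elaborate_answer_py words (elaborate_answer_py words)

-- ===== LEMMAS AND PROOFS =====

-- the per-word message chunk of a valid word
def pvEntry (w : String × String × Option Int) : List Char :=
  w.1.toList ++ [' '] ++ w.2.1.toList ++ [' '] ++ PySem.Int.toChars (w.2.2.getD 0)

def pvWrongs (ws : List (String × String × Option Int)) : List String :=
  (ws.filter (fun w => w.2.2.isNone)).map (fun w => w.2.1)

def pvPts (ws : List (String × String × Option Int)) : Int :=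
  (ws.map (fun w => w.2.2.getD 0)).sum

def pvMsg (ws : List (String × String × Option Int)) : List Char :=
  PySem.Chars.join [',', ' '] ((ws.filter (fun w => w.2.2.isSome)).map pvEntry)

theorem pvEntry_ne_nil (w : String × String × Option Int) : pvEntry w ≠ [] := by
  simp [pvEntry]

theorem pvJoin_ne_nil (sep : List Char) (es : List (List Char))
    (hne : es ≠ []) (hall : ∀ e ∈ es, e ≠ []) : PySem.Chars.join sep es ≠ [] := by
  match es with
  | [] => exact absurd rfl hne
  | [e] => simpa [PySem.Chars.join_singleton] using hall e (by simp)
  | e :: f :: tl =>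
    rw [PySem.Chars.join_cons_cons]
    have := hall e (by simp)
    intro h
    simp [List.append_eq_nil_iff] at h
    exact this h.1

theorem pvJoin_append (sep : List Char) (es1 es2 : List (List Char))
    (h1 : es1 ≠ []) (h2 : es2 ≠ []) :
    PySem.Chars.join sep (es1 ++ es2)
      = PySem.Chars.join sep es1 ++ sep ++ PySem.Chars.join sep es2 := by
  induction es1 with
  | nil => exact absurd rfl h1
  | cons a tl ih =>
    cases tl with
    | nil =>
      cases es2 with
      | nil => exact absurd rfl h2
      | cons b tl2 => simp [PySem.Chars.join_cons_cons, PySem.Chars.join_singleton]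
    | cons b tl2 =>
      have := ih (by simp)
      simp only [List.cons_append] at this ⊢
      rw [PySem.Chars.join_cons_cons, this, PySem.Chars.join_cons_cons]
      simp [List.append_assoc]

-- characterization of B's divide-and-conquer
theorem pvSolve_char (ws : List (String × String × Option Int)) :
    pvSolve ws = (pvWrongs ws, pvPts ws, pvMsg ws) := by
  induction ws using pvSolve.induct with
  | case1 => simp [pvSolve, pvWrongs, pvPts, pvMsg, PySem.Chars.join_nil]
  | case2 w hv =>
    simp [pvSolve, hv, pvWrongs, pvPts, pvMsg, PySem.Chars.join_nil, List.filter]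
  | case3 w v hv =>
    simp [pvSolve, hv, pvWrongs, pvPts, pvMsg, PySem.Chars.join_singleton, pvEntry, List.filter]
  | case4 a b t mid ihl ihr =>
    rw [pvSolve, ihl, ihr]
    have htd : (a :: b :: t).take mid ++ (a :: b :: t).drop mid = a :: b :: t :=
      List.take_append_drop _ _
    set L := (a :: b :: t).take mid with hL
    set R := (a :: b :: t).drop mid with hR
    simp only [Prod.mk.injEq]
    refine ⟨?_, ?_, ?_⟩
    · rw [← htd]; simp [pvWrongs, List.filter_append]
    · rw [← htd]; simp [pvPts]
    · have hmsg_nil : ∀ xs : List (String × String × Option Int),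
          (pvMsg xs = [] ↔ (xs.filter (fun w => w.2.2.isSome)).map pvEntry = []) := by
        intro xs
        constructor
        · intro h
          by_contra hne
          exact pvJoin_ne_nil _ _ hne (by
            intro e he
            obtain ⟨w, _, rfl⟩ := List.mem_map.mp he
            exact pvEntry_ne_nil w) h
        · intro h; simp [pvMsg, h, PySem.Chars.join_nil]
      by_cases hLn : (L.filter (fun w => w.2.2.isSome)).map pvEntry = []
      · have hL0 : pvMsg L = [] := by simp [pvMsg, hLn, PySem.Chars.join_nil]
        rw [if_neg (by simp [hL0])]
        rw [hL0]
        have : pvMsg (a :: b :: t) = pvMsg R := by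
          rw [← htd]
          simp only [pvMsg, List.filter_append, List.map_append, hLn, List.nil_append]
        simp [this]
      · by_cases hRn : (R.filter (fun w => w.2.2.isSome)).map pvEntry = []
        · have hR0 : pvMsg R = [] := by simp [pvMsg, hRn, PySem.Chars.join_nil]
          rw [if_neg (by simp [hR0])]
          rw [hR0]
          have : pvMsg (a :: b :: t) = pvMsg L := by
            rw [← htd]
            simp only [pvMsg, List.filter_append, List.map_append, hRn, List.append_nil]
          simp [this]
        · have hLm : pvMsg L ≠ [] := fun h => hLn ((hmsg_nil L).mp h)
          have hRm : pvMsg R ≠ [] := fun h => hRn ((hmsg_nil R).mp h)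
          rw [if_pos ⟨hLm, hRm⟩]
          have : pvMsg (a :: b :: t) = pvMsg L ++ [',', ' '] ++ pvMsg R := by
            rw [← htd]
            simp only [pvMsg, List.filter_append, List.map_append]
            exact pvJoin_append _ _ _ hLn hRn
          simp [this]

-- characterization of A's fold
theorem pvLoop_char (words : List (String × String × Option Int)) (p : Int) (wr : List String) (m : List Char) :
    words.foldl
      (fun (st : Int × List String × List Char) w =>
        match w.2.2 with
        | none => (st.1, st.2.1 ++ [w.2.1], st.2.2)
        | some v => (st.1 + v, st.2.1,
            st.2.2 ++ w.1.toList ++ [' '] ++ w.2.1.toList ++ [' '] ++ PySem.Int.toChars v ++ [',', ' ']))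
      (p, wr, m)
    = (p + pvPts words,
       wr ++ pvWrongs words,
       m ++ ((words.filter (fun w => w.2.2.isSome)).map (fun w => pvEntry w ++ [',', ' '])).flatten) := by
  induction words generalizing p wr m with
  | nil => simp [pvPts, pvWrongs]
  | cons w rest ih =>
    cases h : w.2.2 with
    | none =>
      simp only [List.foldl_cons, h, ih, List.filter_cons]
      simp [h, pvEntry, pvPts, pvWrongs, List.append_assoc]
    | some v =>
      simp only [List.foldl_cons, h, ih, List.filter_cons]
      simp [h, pvEntry, pvPts, pvWrongs, List.append_assoc, add_assoc]

-- joining with a trailing ", ", then trimming it with msg[:-2], equals ", ".join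
theorem pvFlatten_trim (entries : List (List Char)) :
    PySem.List.slice ((entries.map (fun e => e ++ [',', ' '])).flatten) none (some (-2))
      = PySem.Chars.join [',', ' '] entries := by
  have hflat : ∀ es : List (List Char), es ≠ [] →
      (es.map (fun e => e ++ [',', ' '])).flatten = PySem.Chars.join [',', ' '] es ++ [',', ' '] := by
    intro es hne
    induction es with
    | nil => exact absurd rfl hne
    | cons a tl ih =>
      cases tl with
      | nil => simp [PySem.Chars.join_singleton]
      | cons b tl2 =>
        rw [PySem.Chars.join_cons_cons]
        have := ih (by simp)
        simp only [List.map_cons, List.flatten_cons] at this ⊢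
        rw [this]
        simp [List.append_assoc]
  cases entries with
  | nil => simp [PySem.Chars.join_nil, PySem.List.slice]
  | cons a tl =>
    rw [hflat (a :: tl) (by simp)]
    rw [PySem.List.slice_to_neg_ofNat _ 2 (by omega)]
    simp

-- ===== VERDICT (by name: the statement is the Claim_ definition above) =====
theorem elaborate_answer_py_spec : Claim_equal_elaborate_answer_py := by
  intro words _
  unfold Spec_elaborate_answer_py elaborate_answer_py elaborate_answer_py_alt
  rw [pvSolve_char]
  simp only [pvLoop_char, Int.zero_add, List.nil_append]
  by_cases hw : pvWrongs words = []
  · rw [if_neg (by simp [hw]), if_neg (by simp [hw])]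
    have hmm : (words.filter (fun w => w.2.2.isSome)).map (fun w => pvEntry w ++ [',', ' '])
        = ((words.filter (fun w => w.2.2.isSome)).map pvEntry).map (fun e => e ++ [',', ' ']) := by
      simp
    rw [hmm, pvFlatten_trim]
    rfl
  · rw [if_pos (by simp [List.length_pos_iff, hw]), if_pos (by simp [hw])]
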